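-- pv_equiv track=rewrite | github.com/Bradysm/daily_coding_problems | longestIncSubSeq.py | lis_h
-- ===== SOURCE A (Python) =====
-- from copy import deepcopy
--
-- def lis_h(nums, i):
--     if i == len(nums): return [[]]
--     arr = []
--     for seq in lis_h(nums, i+1):
--         t = deepcopy(seq)
--         arr.append(t)
--         if len(seq) == 0 or (len(seq) > 0 and nums[i] < seq[-1]): # check to see if it's less than the last one
--             seq.append(nums[i])
--             arr.append(seq)
--     return arr
-- ===== SOURCE B (Python) =====
-- def lis_h(nums, i):
--     arr = [[]]
--     for j in range(len(nums) - 1, i - 1, -1):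
--         new = []
--         for seq in arr:
--             new.append(list(seq))
--             if not seq or nums[j] < seq[-1]:
--                 new.append(seq + [nums[j]])
--         arr = new
--     return arr
-- ===== Notes on version B (the rewrite author's own statement) =====
-- stated objective: alternative
-- what changed: Replaces the top-down recursion (with deepcopy of every sequence) by a bottom-up iterative loop over indices from len(nums)-1 down to i that rebuilds the list of subsequences each step with shallow copies.
import Mathlib
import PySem

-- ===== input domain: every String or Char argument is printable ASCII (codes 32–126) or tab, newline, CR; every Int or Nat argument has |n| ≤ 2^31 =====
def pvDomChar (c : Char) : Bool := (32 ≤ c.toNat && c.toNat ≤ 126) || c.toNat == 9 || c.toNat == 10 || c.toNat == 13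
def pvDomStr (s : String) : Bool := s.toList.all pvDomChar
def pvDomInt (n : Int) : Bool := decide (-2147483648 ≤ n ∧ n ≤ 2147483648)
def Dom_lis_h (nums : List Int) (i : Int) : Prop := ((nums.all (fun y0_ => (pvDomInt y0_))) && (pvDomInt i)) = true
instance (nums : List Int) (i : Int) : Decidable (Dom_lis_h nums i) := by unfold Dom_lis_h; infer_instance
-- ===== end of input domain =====

-- B replaces A's top-down recursion (which deepcopies every sequence) by a bottom-up
-- iterative loop over the indices, rebuilding the list of subsequences each step.

-- ===== PORT A =====
def lis_h (nums : List Int) (i : Int) : List (List Int) :=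
  if _h1 : i = (nums.length : Int) then [[]]
  else if _h2 : (nums.length : Int) < i then []  -- Python A never returns here (infinite recursion); outside Pre_
  else match PySem.List.pyGet? nums i with
    | none => []  -- Python A raises IndexError here; outside Pre_
    | some v =>
      (lis_h nums (i + 1)).foldl
        (fun arr seq =>
          let arr := arr ++ [seq]
          if seq.length = 0 ∨ (0 < seq.length ∧ v < (PySem.List.pyGet? seq (-1)).getD 0)
          then arr ++ [seq ++ [v]] else arr) []
termination_by ((nums.length : Int) + 1 - i).toNat
decreasing_by simp_wf; omega

-- ===== PORT B =====
def lis_h_alt (nums : List Int) (i : Int) : List (List Int) :=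
  (PySem.List.pyRange ((nums.length : Int) - 1) (i - 1) (-1)).foldl
    (fun arr j =>
      let x := (PySem.List.pyGet? nums j).getD 0  -- under Pre_ every j in the range is a valid index
      arr.foldl (fun new seq =>
        let new := new ++ [seq]
        if seq = [] ∨ x < (PySem.List.pyGet? seq (-1)).getD 0
        then new ++ [seq ++ [x]] else new) [])
    [[]]

-- ===== PRECONDITION & SPEC =====
-- Pre_ excludes exactly the inputs where Python A does not return:
-- i > len(nums) (infinite recursion, RecursionError) and i < -len(nums) (IndexError).
def Pre_lis_h (nums : List Int) (i : Int) : Prop :=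
  -(nums.length : Int) ≤ i ∧ i ≤ (nums.length : Int)
instance (nums : List Int) (i : Int) : Decidable (Pre_lis_h nums i) := by
  unfold Pre_lis_h; infer_instance
def pvWitness_lis_h : List Int × Int := ([3, 1, 2], 0)

def Spec_lis_h (nums : List Int) (i : Int) (out : List (List Int)) : Prop := out = lis_h_alt nums i
instance (nums : List Int) (i : Int) (out : List (List Int)) : Decidable (Spec_lis_h nums i out) := by unfold Spec_lis_h; infer_instance

-- ===== CLAIM (what is proved, stated in full; the proofs are below) =====
def Claim_equal_lis_h : Prop := ∀ (nums : List Int) (i : Int), Dom_lis_h nums i → Pre_lis_h nums i → Spec_lis_h nums i (lis_h nums i)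

-- ===== LEMMAS AND PROOFS =====

-- A's and B's append conditions agree on every sequence.
lemma pv_cond_iff (v : Int) (seq : List Int) :
    (seq.length = 0 ∨ (0 < seq.length ∧ v < (PySem.List.pyGet? seq (-1)).getD 0)) ↔
    (seq = [] ∨ v < (PySem.List.pyGet? seq (-1)).getD 0) := by
  cases seq <;> simp

-- splitting a countdown range at its last element
lemma pv_range_split (a b : Int) (h : b ≤ a) :
    PySem.List.pyRange a (b - 1) (-1) = PySem.List.pyRange a b (-1) ++ [b] := by
  rw [PySem.List.pyRange_neg_one_eq_reverse, PySem.List.pyRange_neg_one_eq_reverse]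
  have hb : b - 1 + 1 = b := by ring
  rw [hb, PySem.List.pyRange_one_cons (by omega : b < a + 1)]
  simp

-- one unrolling of B's outer loop, peeling the final index i
lemma pv_alt_unfold (nums : List Int) (i : Int) (h : i < (nums.length : Int)) :
    lis_h_alt nums i =
      (lis_h_alt nums (i + 1)).foldl (fun new seq =>
        let new := new ++ [seq]
        if seq = [] ∨ (PySem.List.pyGet? nums i).getD 0 < (PySem.List.pyGet? seq (-1)).getD 0
        then new ++ [seq ++ [(PySem.List.pyGet? nums i).getD 0]] else new) [] := by
  unfold lis_h_alt
  rw [pv_range_split ((nums.length : Int) - 1) i (by omega), List.foldl_append]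
  have h1 : i + 1 - 1 = i := by ring
  rw [h1]
  simp only [List.foldl_cons, List.foldl_nil]

-- the two inner loop bodies produce the same fold, since the conditions agree
lemma pv_fold_eq (v : Int) (acc : List (List Int)) : ∀ (pre : List (List Int)),
    acc.foldl (fun arr seq =>
        let arr := arr ++ [seq]
        if seq.length = 0 ∨ (0 < seq.length ∧ v < (PySem.List.pyGet? seq (-1)).getD 0)
        then arr ++ [seq ++ [v]] else arr) pre =
    acc.foldl (fun new seq =>
        let new := new ++ [seq]
        if seq = [] ∨ v < (PySem.List.pyGet? seq (-1)).getD 0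
        then new ++ [seq ++ [v]] else new) pre := by
  induction acc with
  | nil => intro pre; rfl
  | cons s t ih =>
    intro pre
    simp only [List.foldl_cons]
    by_cases hc : s = [] ∨ v < (PySem.List.pyGet? s (-1)).getD 0
    · rw [if_pos ((pv_cond_iff v s).mpr hc), if_pos hc]; exact ih _
    · rw [if_neg (fun h => hc ((pv_cond_iff v s).mp h)), if_neg hc]; exact ih _

theorem pv_main (nums : List Int) (k : Nat) : ∀ (i : Int),
    (nums.length : Int) - i = (k : Int) →
    -(nums.length : Int) ≤ i → i ≤ (nums.length : Int) →
    lis_h nums i = lis_h_alt nums i := by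
  induction k with
  | zero =>
    intro i hk _ _
    have hi : i = (nums.length : Int) := by omega
    subst hi
    rw [lis_h]
    simp only []
    unfold lis_h_alt
    rw [PySem.List.pyRange_neg_one_eq_nil (by omega)]
    rfl
  | succ k ih =>
    intro i hk hlo hhi
    have hlt : i < (nums.length : Int) := by omega
    obtain ⟨v, hv⟩ : ∃ v, PySem.List.pyGet? nums i = some v := by
      cases h : PySem.List.pyGet? nums i with
      | none =>
        rw [PySem.List.pyGet?_eq_none_iff] at h
        exact absurd (by simp [PySem.Raise.InRange]; omega) h
      | some v => exact ⟨v, rfl⟩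
    rw [lis_h]
    rw [dif_neg (by omega), dif_neg (by omega), hv]
    rw [ih (i + 1) (by omega) (by omega) (by omega)]
    rw [pv_alt_unfold nums i hlt, hv]
    simp only [Option.getD_some]
    exact pv_fold_eq v (lis_h_alt nums (i + 1)) []

-- ===== VERDICT (by name: the statement is the Claim_ definition above) =====
theorem lis_h_spec : Claim_equal_lis_h := by
  intro nums i _ hpre
  unfold Pre_lis_h at hpre
  unfold Spec_lis_h
  exact pv_main nums ((nums.length : Int) - i).toNat i (by omega) hpre.1 hpre.2
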